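-- pv_equiv track=rewrite | github.com/josephpeter231/DSA-Upsolved-Problemns | Difficulty: Medium/Maximum Difference/maximum-difference.py | findMaxDiff
-- ===== SOURCE A (Python) =====
-- def findMaxDiff(arr):
--     n = len(arr)
--     left_smaller = [0] * n
--     right_smaller = [0] * n
--
--     # Finding nearest smaller to left for each element
--     stack = []
--     for i in range(n):
--         while stack and stack[-1] >= arr[i]:
--             stack.pop()
--         if stack:
--             left_smaller[i] = stack[-1]
--         else:
--             left_smaller[i] = 0
--         stack.append(arr[i])
--
--     # Finding nearest smaller to right for each element
--     stack = []
--     for i in range(n-1, -1, -1):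
--         while stack and stack[-1] >= arr[i]:
--             stack.pop()
--         if stack:
--             right_smaller[i] = stack[-1]
--         else:
--             right_smaller[i] = 0
--         stack.append(arr[i])
--
--     # Calculate the maximum absolute difference
--     maxi = 0
--     for i in range(n):
--         maxi = max(maxi, abs(left_smaller[i] - right_smaller[i]))
--
--     return maxi
-- ===== SOURCE B (Python) =====
-- def findMaxDiff(arr):
--     n = len(arr)
--     maxi = 0
--     for i in range(n):
--         left = 0
--         for j in range(i - 1, -1, -1):
--             if arr[j] < arr[i]:
--                 left = arr[j]
--                 break
--         right = 0
--         for j in range(i + 1, n):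
--             if arr[j] < arr[i]:
--                 right = arr[j]
--                 break
--         maxi = max(maxi, abs(left - right))
--     return maxi
-- ===== Notes on version B (the rewrite author's own statement) =====
-- stated objective: simpler
-- what changed: Replaces the two monotonic-stack passes and the three intermediate arrays with a single loop that, for each element, directly scans left and right for the nearest strictly-smaller neighbour.
import Mathlib
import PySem

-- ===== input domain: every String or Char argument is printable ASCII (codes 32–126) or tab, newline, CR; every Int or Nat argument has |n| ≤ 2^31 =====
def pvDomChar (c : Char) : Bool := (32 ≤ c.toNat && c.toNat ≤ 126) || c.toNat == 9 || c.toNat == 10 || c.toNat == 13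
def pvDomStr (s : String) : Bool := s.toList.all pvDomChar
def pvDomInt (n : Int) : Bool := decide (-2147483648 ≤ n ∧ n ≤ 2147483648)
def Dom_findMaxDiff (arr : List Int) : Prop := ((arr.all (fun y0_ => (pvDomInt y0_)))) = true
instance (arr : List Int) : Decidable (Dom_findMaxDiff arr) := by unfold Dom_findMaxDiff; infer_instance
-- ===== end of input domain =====

-- B replaces A's two monotonic-stack passes by a direct nearest-smaller scan per element (simpler, not faster).


-- ===== PORT A =====
-- stack with top = head; 'while stack and stack[-1] >= x: stack.pop()'
def popGE (st : List Int) (x : Int) : List Int :=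
  match st with
  | [] => []
  | y :: ys => if x ≤ y then popGE ys x else y :: ys

-- one iteration of A's nearest-smaller pass: pop, read top (else 0), push, append
def passStep (s : List Int × List Int) (x : Int) : List Int × List Int :=
  let st := popGE s.1 x
  (x :: st, s.2 ++ [st.headD 0])

def findMaxDiff (arr : List Int) : Int :=
  -- left pass: for i in range(n), i.e. fold over arr
  let left := (arr.foldl passStep ([], [])).2
  -- right pass: for i in range(n-1,-1,-1), i.e. the same loop over the reversed
  -- list, values produced in descending-i order, hence reversed at the end
  let right := ((arr.reverse.foldl passStep ([], [])).2).reverse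
  -- maxi = max(maxi, abs(left[i] - right[i])) over all i
  (left.zip right).foldl (fun m p => max m |p.1 - p.2|) 0

-- ===== PORT B =====
-- first element < z of the list, else 0 (B's inner scan with break)
def firstLt (z : Int) : List Int → Int
  | [] => 0
  | y :: ys => if y < z then y else firstLt z ys

-- B's single loop: revPre = elements left of the current one (nearest first),
-- rest = elements to the right, m = running maximum
def goB (revPre : List Int) (l : List Int) (m : Int) : Int :=
  match l with
  | [] => m
  | x :: rest => goB (x :: revPre) rest (max m |firstLt x revPre - firstLt x rest|)

def findMaxDiff_alt (arr : List Int) : Int := goB [] arr 0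

-- ===== PRECONDITION & SPEC =====
def Spec_findMaxDiff (arr : List Int) (out : Int) : Prop := out = findMaxDiff_alt arr
instance (arr : List Int) (out : Int) : Decidable (Spec_findMaxDiff arr out) := by unfold Spec_findMaxDiff; infer_instance

-- ===== CLAIM (what is proved, stated in full; the proofs are below) =====
def Claim_equal_findMaxDiff : Prop := ∀ (arr : List Int), Dom_findMaxDiff arr → Spec_findMaxDiff arr (findMaxDiff arr)

-- ===== LEMMAS AND PROOFS =====

-- the per-position values the passes compute, as a structural recursion
def lvals (pre : List Int) : List Int → List Int
  | [] => []
  | x :: rest => firstLt x pre :: lvals (x :: pre) rest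

-- right-to-left values, with a trailing context `pre`
def rvalsP (pre : List Int) : List Int → List Int
  | [] => []
  | x :: rest => firstLt x (rest ++ pre) :: rvalsP pre rest

-- the top after popping the ≥-elements is exactly the first strictly-smaller one
theorem popGE_headD (st : List Int) (x : Int) : (popGE st x).head?.getD 0 = firstLt x st := by
  induction st with
  | nil => rfl
  | cons y ys ih =>
      simp only [popGE, firstLt]
      by_cases h : x ≤ y
      · rw [if_pos h, if_neg (by omega : ¬ y < x)]; exact ih
      · rw [if_neg h, if_pos (by omega : y < x)]; rfl

-- popping elements ≥ x does not change the first element < z, when z ≤ x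
theorem firstLt_popGE (st : List Int) (x z : Int) (hz : z ≤ x) :
    firstLt z (popGE st x) = firstLt z st := by
  induction st with
  | nil => rfl
  | cons y ys ih =>
      simp only [popGE]
      by_cases h : x ≤ y
      · simp only [if_pos h, ih]
        simp [firstLt, show ¬ y < z by omega]
      · simp [h]

-- main invariant: if the stack answers every firstLt query like the reversed
-- prefix does, the pass outputs exactly lvals of that prefix
theorem foldl_passStep (l : List Int) :
    ∀ (st acc pre : List Int), (∀ z, firstLt z st = firstLt z pre) →
    (l.foldl passStep (st, acc)).2 = acc ++ lvals pre l := by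
  induction l with
  | nil => intro st acc pre _; simp [lvals]
  | cons x rest ih =>
      intro st acc pre hinv
      have hv : (popGE st x).head?.getD 0 = firstLt x pre := by
        rw [popGE_headD]; exact hinv x
      have hinv' : ∀ z, firstLt z (x :: popGE st x) = firstLt z (x :: pre) := by
        intro z
        simp only [firstLt]
        by_cases hxz : x < z
        · simp [hxz]
        · simp only [if_neg hxz]
          rw [firstLt_popGE st x z (by omega)]
          exact hinv z
      simp only [List.foldl_cons, passStep]
      rw [ih (x :: popGE st x) (acc ++ [(popGE st x).headD 0]) (x :: pre) hinv']
      simp [lvals, hv]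

theorem lvals_append (a : List Int) :
    ∀ (b pre : List Int), lvals pre (a ++ b) = lvals pre a ++ lvals (a.reverse ++ pre) b := by
  induction a with
  | nil => intro b pre; simp [lvals]
  | cons x a' ih =>
      intro b pre
      simp only [List.cons_append, lvals, ih b (x :: pre)]
      simp

-- running the pass over the reversed list and reversing gives rvalsP
theorem lvals_reverse (pre : List Int) (l : List Int) :
    (lvals pre l.reverse).reverse = rvalsP pre l := by
  induction l with
  | nil => rfl
  | cons x rest ih =>
      simp only [List.reverse_cons]
      rw [lvals_append]
      simp [lvals, rvalsP, ih]

-- B's loop is the zipped max-fold of the two value lists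
theorem goB_zip (l : List Int) :
    ∀ (pre : List Int) (m : Int),
      goB pre l m = ((lvals pre l).zip (rvalsP [] l)).foldl (fun m p => max m |p.1 - p.2|) m := by
  induction l with
  | nil => intro pre m; rfl
  | cons x rest ih =>
      intro pre m
      simp only [goB, lvals, rvalsP, List.zip_cons_cons, List.foldl_cons, List.append_nil]
      exact ih (x :: pre) _

-- ===== VERDICT (by name: the statement is the Claim_ definition above) =====
theorem findMaxDiff_spec : Claim_equal_findMaxDiff := by
  intro arr _
  unfold Spec_findMaxDiff findMaxDiff findMaxDiff_alt
  have hL := foldl_passStep arr [] [] [] (fun z => rfl)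
  have hR := foldl_passStep arr.reverse [] [] [] (fun z => rfl)
  simp only [List.nil_append] at hL hR
  rw [hL, hR, lvals_reverse, goB_zip]
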